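-- pv_equiv track=rewrite | github.com/adfio1234/Algorithms | 프로그래머스/2/42888. 오픈채팅방/오픈채팅방.py | solution
-- ===== SOURCE A (Python) =====
-- def solution(record):
--     answer = []
--     user=dict()
--
--     for i in record:
--         message=i.split()
--         if len(message)==3:
--             if message[0]=="Enter":
--                 if message[1] not in user:
--                     user[message[1]]=message[2]
--                 elif message[1] in user:
--                     user[message[1]]=message[2]
--             elif message[0]=="Change":
--                 user[message[1]]=message[2]
--
--     for i in record:
--         message=i.split()
--         if len(message)==3:
--             if message[0]=="Enter":
--                 welcome="님이 들어왔습니다."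
--                 answer.append(user[message[1]]+welcome)
--         if len(message)==2:
--             exit="님이 나갔습니다."
--             answer.append(user[message[1]]+exit)
--
--     return answer
-- ===== SOURCE B (Python) =====
-- def solution(record):
--     user = {}
--     events = []
--     for line in record:
--         parts = line.split()
--         if len(parts) == 3:
--             if parts[0] == "Enter":
--                 user[parts[1]] = parts[2]
--                 events.append((parts[1], True))
--             elif parts[0] == "Change":
--                 user[parts[1]] = parts[2]
--         elif len(parts) == 2:
--             events.append((parts[1], False))
--     return [user[uid] + ("님이 들어왔습니다." if enter else "님이 나갔습니다.") for uid, enter in events]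
-- ===== Notes on version B (the rewrite author's own statement) =====
-- stated objective: faster
-- what changed: B makes a single pass over record that builds the name dict and an event table (uid, is_enter) together, then renders the answer from the event table, instead of A's two full passes that each re-split every raw record line.
import Mathlib
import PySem

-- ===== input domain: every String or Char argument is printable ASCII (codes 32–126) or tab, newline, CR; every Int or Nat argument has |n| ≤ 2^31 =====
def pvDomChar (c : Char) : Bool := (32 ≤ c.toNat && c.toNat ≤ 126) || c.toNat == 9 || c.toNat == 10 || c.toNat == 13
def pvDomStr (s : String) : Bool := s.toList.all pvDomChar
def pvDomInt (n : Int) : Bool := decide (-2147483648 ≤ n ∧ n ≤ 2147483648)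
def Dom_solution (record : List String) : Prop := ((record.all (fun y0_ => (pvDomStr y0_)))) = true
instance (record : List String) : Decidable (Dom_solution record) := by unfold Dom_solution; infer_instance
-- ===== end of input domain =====

-- B builds the name dict and an event table in ONE pass over record, then renders the answer
-- from the event table, instead of A's two passes that each re-split every raw line. (objective: alternative decomposition)

-- ===== PORT A =====
-- first loop body of A (building the user dict)
def solutionDictStep (user : PySem.Dict String String) (i : String) : PySem.Dict String String :=
  let message := PySem.Str.split₀ i
  if message.length = 3 then
    if message.getD 0 "" = "Enter" then
      if ¬ (user.contains (message.getD 1 "") = true) then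
        user.insert (message.getD 1 "") (message.getD 2 "")
      else if user.contains (message.getD 1 "") = true then
        user.insert (message.getD 1 "") (message.getD 2 "")
      else user
    else if message.getD 0 "" = "Change" then
      user.insert (message.getD 1 "") (message.getD 2 "")
    else user
  else user

-- second loop body of A (building answer); user[...] is total via getD "", in range under Pre_
def solutionAnsStep (user : PySem.Dict String String) (answer : List String) (i : String) : List String :=
  let message := PySem.Str.split₀ i
  let answer :=
    if message.length = 3 then
      if message.getD 0 "" = "Enter" then
        answer ++ [((user.get? (message.getD 1 "")).getD "") ++ "님이 들어왔습니다."]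
      else answer
    else answer
  if message.length = 2 then
    answer ++ [((user.get? (message.getD 1 "")).getD "") ++ "님이 나갔습니다."]
  else answer

def solution (record : List String) : List String :=
  let user := record.foldl solutionDictStep PySem.Dict.empty
  record.foldl (solutionAnsStep user) []

-- ===== PORT B =====
-- single-pass loop body of B: updates the (user dict, event table) pair
def solutionAltStep (st : PySem.Dict String String × List (String × Bool)) (line : String) :
    PySem.Dict String String × List (String × Bool) :=
  let parts := PySem.Str.split₀ line
  if parts.length = 3 then
    if parts.getD 0 "" = "Enter" then
      (st.1.insert (parts.getD 1 "") (parts.getD 2 ""), st.2 ++ [(parts.getD 1 "", true)])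
    else if parts.getD 0 "" = "Change" then
      (st.1.insert (parts.getD 1 "") (parts.getD 2 ""), st.2)
    else st
  else if parts.length = 2 then
    (st.1, st.2 ++ [(parts.getD 1 "", false)])
  else st

def solution_alt (record : List String) : List String :=
  let st := record.foldl solutionAltStep (PySem.Dict.empty, [])
  st.2.map (fun p => ((st.1.get? p.1).getD "") ++ (if p.2 then "님이 들어왔습니다." else "님이 나갔습니다."))

-- ===== PRECONDITION & SPEC =====
-- Pre_ excludes exactly the records on which A raises KeyError: a two-word message whose second
-- word was never introduced as the uid of a three-word Enter/Change line (B raises the same KeyError there).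
def Pre_solution (record : List String) : Prop :=
  ∀ r ∈ record, (PySem.Str.split₀ r).length = 2 →
    ∃ s ∈ record, (PySem.Str.split₀ s).length = 3 ∧
      ((PySem.Str.split₀ s).getD 0 "" = "Enter" ∨ (PySem.Str.split₀ s).getD 0 "" = "Change") ∧
      (PySem.Str.split₀ s).getD 1 "" = (PySem.Str.split₀ r).getD 1 ""
instance (record : List String) : Decidable (Pre_solution record) := by unfold Pre_solution; infer_instance

def pvWitness_solution : List String := ["Enter u1 Kim", "Leave u1"]

def Spec_solution (record : List String) (out : List String) : Prop := out = solution_alt record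
instance (record : List String) (out : List String) : Decidable (Spec_solution record out) := by unfold Spec_solution; infer_instance

-- ===== CLAIM (what is proved, stated in full; the proofs are below) =====
def Claim_equal_solution : Prop := ∀ (record : List String), Dom_solution record → Pre_solution record → Spec_solution record (solution record)

-- ===== LEMMAS AND PROOFS =====

-- the event table B's loop accumulates, as a standalone recursive function
def evOf : List String → List (String × Bool)
  | [] => []
  | line :: rest =>
    let parts := PySem.Str.split₀ line
    (if parts.length = 3 then
        (if parts.getD 0 "" = "Enter" then [(parts.getD 1 "", true)] else [])
      else if parts.length = 2 then [(parts.getD 1 "", false)] else []) ++ evOf rest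

-- B's fold computes (A's dict, accumulated event table)
lemma foldl_altStep (record : List String) : ∀ (u : PySem.Dict String String) (ev : List (String × Bool)),
    record.foldl solutionAltStep (u, ev) = (record.foldl solutionDictStep u, ev ++ evOf record) := by
  induction record with
  | nil => intro u ev; simp [evOf]
  | cons line rest ih =>
    intro u ev
    simp only [List.foldl_cons]
    have h := ih (solutionAltStep (u, ev) line).1 (solutionAltStep (u, ev) line).2
    rw [Prod.mk.eta] at h
    rw [h]
    refine Prod.ext ?_ ?_
    · simp only [solutionAltStep, solutionDictStep]
      split_ifs <;> simp_all
    · simp only [solutionAltStep, evOf]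
      split_ifs <;> simp_all

-- A's second pass over record appends exactly the rendering of the event table
lemma foldl_ansStep (u : PySem.Dict String String) (record : List String) : ∀ (acc : List String),
    record.foldl (solutionAnsStep u) acc = acc
    ++ (evOf record).map
      (fun p => ((u.get? p.1).getD "") ++ (if p.2 then "님이 들어왔습니다." else "님이 나갔습니다.")) := by
  induction record with
  | nil => intro acc; simp [evOf]
  | cons line rest ih =>
    intro acc
    simp only [List.foldl_cons, evOf]
    rw [ih]
    simp only [solutionAnsStep]
    split_ifs <;> simp_all

-- ===== VERDICT (by name: the statement is the Claim_ definition above) =====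
theorem solution_spec : Claim_equal_solution := by
  intro record _ _
  unfold Spec_solution solution solution_alt
  rw [foldl_altStep record PySem.Dict.empty []]
  rw [foldl_ansStep (record.foldl solutionDictStep PySem.Dict.empty) record []]
  simp
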